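-- pv_equiv track=rewrite | github.com/Maja-Farazin/matricni-kalkulator | model.py | uredi_v_zgornjetrikotno
-- ===== SOURCE A (Python) =====
-- def uredi_v_zgornjetrikotno(mat):
--     nova_mat = []
--     for j in range(len(mat[0])):
--         for i in range(len(mat)):
--             if mat[i][j] != 0:
--                 nova_mat += [mat[i]]
--         mat = [x for x in mat if x not in nova_mat]
--     return nova_mat + mat
-- ===== SOURCE B (Python) =====
-- def uredi_v_zgornjetrikotno(mat):
--     c = len(mat[0]) if mat else 0
--
--     def kljuc(vrstica):
--         for j, v in enumerate(vrstica[:c]):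
--             if v != 0:
--                 return j
--         return c
--
--     return sorted(mat, key=kljuc)
-- ===== Notes on version B (the rewrite author's own statement) =====
-- stated objective: alternative
-- what changed: Replaced the column-by-column collect-and-remove passes (with list-membership deletions) by a single stable sort of the rows keyed on the index of their first nonzero column (all-zero rows keyed past the end).
import Mathlib
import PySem

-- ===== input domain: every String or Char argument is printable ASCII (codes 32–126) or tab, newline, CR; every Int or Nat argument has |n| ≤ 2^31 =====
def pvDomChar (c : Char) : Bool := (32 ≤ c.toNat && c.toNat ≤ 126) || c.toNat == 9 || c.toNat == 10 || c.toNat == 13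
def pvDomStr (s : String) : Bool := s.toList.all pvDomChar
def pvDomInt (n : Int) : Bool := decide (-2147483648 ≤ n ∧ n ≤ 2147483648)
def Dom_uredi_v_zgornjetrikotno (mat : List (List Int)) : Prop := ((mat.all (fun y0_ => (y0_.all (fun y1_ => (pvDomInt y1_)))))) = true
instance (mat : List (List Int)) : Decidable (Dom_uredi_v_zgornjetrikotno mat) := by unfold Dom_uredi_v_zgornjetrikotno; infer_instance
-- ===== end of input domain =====

-- B replaces A's column-by-column collect-and-remove passes by one stable sort of the rows
-- keyed on the index of their first nonzero column (all-zero rows last).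

-- ===== PORT A =====
-- pass over column j: append each still-present row with a nonzero entry in column j,
-- then drop (by value) every row already collected; mat[i][j] is r.getD j 0 (exact on Pre_).
def uredi_v_zgornjetrikotno (mat : List (List Int)) : List (List Int) :=
  let st := (List.range mat.headI.length).foldl
    (fun (st : List (List Int) × List (List Int)) j =>
      let nova := st.2.foldl (fun acc r => if r.getD j 0 ≠ 0 then acc ++ [r] else acc) st.1
      (nova, st.2.filter (fun x => !(nova.contains x))))
    ([], mat)
  st.1 ++ st.2

-- ===== PORT B =====
-- the Python helper kljuc: scan vrstica[:c], return the index of the first nonzero entry, else c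
def pvKljucGo (c : Nat) (j : Nat) : List Int → Nat
  | [] => c
  | v :: rest => if v ≠ 0 then j else pvKljucGo c (j + 1) rest

def pvKljuc (c : Nat) (r : List Int) : Nat := pvKljucGo c 0 (r.take c)

def uredi_v_zgornjetrikotno_alt (mat : List (List Int)) : List (List Int) :=
  let c := mat.headI.length
  PySem.List.sorted mat (fun r => pvKljuc c r)

-- ===== PRECONDITION & SPEC =====
-- Pre_ holds exactly where Python A returns: it excludes the empty matrix (len(mat[0])
-- raises IndexError) and matrices containing an all-zero row shorter than the first row
-- (such a row survives every pass and is eventually indexed past its end, IndexError).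
def Pre_uredi_v_zgornjetrikotno (mat : List (List Int)) : Prop :=
  mat ≠ [] ∧ ∀ r ∈ mat, mat.headI.length ≤ r.length ∨ ∃ v ∈ r, v ≠ 0
instance (mat : List (List Int)) : Decidable (Pre_uredi_v_zgornjetrikotno mat) := by
  unfold Pre_uredi_v_zgornjetrikotno; infer_instance

def pvWitness_uredi_v_zgornjetrikotno : List (List Int) := [[0, 2], [1, 0], [0, 0]]

def Spec_uredi_v_zgornjetrikotno (mat : List (List Int)) (out : List (List Int)) : Prop := out = uredi_v_zgornjetrikotno_alt mat
instance (mat : List (List Int)) (out : List (List Int)) : Decidable (Spec_uredi_v_zgornjetrikotno mat out) := by unfold Spec_uredi_v_zgornjetrikotno; infer_instance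

-- ===== CLAIM (what is proved, stated in full; the proofs are below) =====
def Claim_equal_uredi_v_zgornjetrikotno : Prop := ∀ (mat : List (List Int)), Dom_uredi_v_zgornjetrikotno mat → Pre_uredi_v_zgornjetrikotno mat → Spec_uredi_v_zgornjetrikotno mat (uredi_v_zgornjetrikotno mat)

-- ===== LEMMAS AND PROOFS =====

-- buckets: the rows of xs with key v, for v running over vs, in order
def pvBuckets (k : List Int → Nat) (vs : List Nat) (xs : List (List Int)) : List (List Int) :=
  vs.flatMap (fun v => xs.filter (fun r => k r == v))

lemma pvKljucGo_spec (c : Nat) (l : List Int) (j : Nat) :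
    (∃ m, m < l.length ∧ pvKljucGo c j l = j + m ∧ l.getD m 0 ≠ 0 ∧ ∀ i < m, l.getD i 0 = 0)
    ∨ (pvKljucGo c j l = c ∧ ∀ i, l.getD i 0 = 0) := by
  induction l generalizing j with
  | nil => exact Or.inr ⟨rfl, by simp⟩
  | cons v rest ih =>
    by_cases hv : v ≠ 0
    · refine Or.inl ⟨0, by simp, ?_, by simpa using hv, by omega⟩
      simp [pvKljucGo, hv]
    · rw [not_not] at hv
      rcases ih (j + 1) with ⟨m, hm, he, hne, hz⟩ | ⟨he, hz⟩
      · refine Or.inl ⟨m + 1, by simpa using hm, ?_, by simpa using hne, ?_⟩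
        · simp [pvKljucGo, hv, he]; omega
        · intro i hi
          cases i with
          | zero => simpa using hv
          | succ i' => simpa using hz i' (by omega)
      · refine Or.inr ⟨by simp [pvKljucGo, hv, he], ?_⟩
        intro i
        cases i with
        | zero => simpa using hv
        | succ i' => simpa using hz i'

lemma take_getD (c i : Nat) (r : List Int) :
    (r.take c).getD i 0 = if i < c then r.getD i 0 else 0 := by
  simp only [List.getD_eq_getElem?_getD, List.getElem?_take]
  split <;> simp

lemma pvKljuc_le (c : Nat) (r : List Int) : pvKljuc c r ≤ c := by
  rcases pvKljucGo_spec c (r.take c) 0 with ⟨m, hm, he, _, _⟩ | ⟨he, _⟩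
  · have : (r.take c).length ≤ c := by simp [List.length_take]
    unfold pvKljuc; omega
  · unfold pvKljuc; omega

lemma pvKljuc_getD (c : Nat) (r : List Int) (h : pvKljuc c r < c) :
    r.getD (pvKljuc c r) 0 ≠ 0 := by
  rcases pvKljucGo_spec c (r.take c) 0 with ⟨m, hm, he, hne, _⟩ | ⟨he, _⟩
  · have hk : pvKljuc c r = m := by unfold pvKljuc; omega
    rw [hk]
    have := take_getD c m r
    rw [if_pos (by rw [hk] at h; omega)] at this
    rw [← this]; exact hne
  · exact absurd h (by unfold pvKljuc; omega)

lemma pvKljuc_zeros (c : Nat) (r : List Int) (i : Nat) (h : i < pvKljuc c r) :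
    r.getD i 0 = 0 := by
  have hle := pvKljuc_le c r
  have hic : i < c := by omega
  rcases pvKljucGo_spec c (r.take c) 0 with ⟨m, hm, he, _, hz⟩ | ⟨he, hz⟩
  · have hk : pvKljuc c r = m := by unfold pvKljuc; omega
    have := hz i (by omega)
    rwa [take_getD, if_pos hic] at this
  · have := hz i
    rwa [take_getD, if_pos hic] at this

lemma pvKljuc_eq_iff (c j : Nat) (r : List Int) (hj : j < c) :
    pvKljuc c r = j ↔ (j ≤ pvKljuc c r ∧ r.getD j 0 ≠ 0) := by
  constructor
  · intro h
    refine ⟨by omega, ?_⟩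
    rw [← h]; exact pvKljuc_getD c r (by omega)
  · rintro ⟨h1, h2⟩
    by_contra hne
    exact h2 (pvKljuc_zeros c r j (by omega))

lemma mem_pvBuckets (k : List Int → Nat) (vs : List Nat) (xs : List (List Int)) (r : List Int) :
    r ∈ pvBuckets k vs xs ↔ r ∈ xs ∧ k r ∈ vs := by
  simp only [pvBuckets, List.mem_flatMap, List.mem_filter, beq_iff_eq]
  constructor
  · rintro ⟨v, hv, hr, hk⟩; exact ⟨hr, hk ▸ hv⟩
  · rintro ⟨hr, hk⟩; exact ⟨k r, hk, hr, rfl⟩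

lemma insertBy_append_not {α : Type} (before : α → α → Bool) (x : α) (l1 l2 : List α)
    (h : ∀ y ∈ l1, before x y = false) :
    PySem.List.insertBy before x (l1 ++ l2) = l1 ++ PySem.List.insertBy before x l2 := by
  induction l1 with
  | nil => simp
  | cons a t ih =>
    have ha : before x a = false := h a (by simp)
    simp only [List.cons_append, PySem.List.insertBy, ha, Bool.false_eq_true, if_false]
    rw [show PySem.List.insertBy before x (t ++ l2) = t ++ PySem.List.insertBy before x l2 from
      ih (fun y hy => h y (by simp [hy]))]

lemma insertBy_all_before {α : Type} (before : α → α → Bool) (x : α) (l : List α)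
    (h : ∀ y ∈ l, before x y = true) :
    PySem.List.insertBy before x l = x :: l := by
  cases l with
  | nil => rfl
  | cons a t => simp [PySem.List.insertBy, h a (by simp)]

lemma pvBuckets_snoc_not (k : List Int → Nat) (vs : List Nat) (ys : List (List Int))
    (x : List Int) (hx : k x ∉ vs) :
    pvBuckets k vs (ys ++ [x]) = pvBuckets k vs ys := by
  induction vs with
  | nil => rfl
  | cons v t ih =>
    have hxv : (k x == v) = false := by
      simp only [beq_eq_false_iff_ne, ne_eq]; intro h; exact hx (by simp [h])
    simp only [pvBuckets, List.flatMap_cons] at *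
    rw [List.filter_append, ih (fun h => hx (by simp [h]))]
    simp [hxv]

lemma insert_pvBuckets (k : List Int → Nat) (x : List Int) (vs : List Nat)
    (ys : List (List Int)) (hvs : vs.Pairwise (· < ·)) (hx : k x ∈ vs) :
    PySem.List.insertBy (fun a b => decide (k a < k b)) x (pvBuckets k vs ys)
      = pvBuckets k vs (ys ++ [x]) := by
  induction vs generalizing ys with
  | nil => simp at hx
  | cons v t ih =>
    have hpt := (List.pairwise_cons.mp hvs).2
    have hvt := (List.pairwise_cons.mp hvs).1
    simp only [pvBuckets, List.flatMap_cons] at *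
    by_cases hxv : k x = v
    · have h1 : ∀ y ∈ ys.filter (fun r => k r == v), decide (k x < k y) = false := by
        intro y hy
        have : k y = v := by simpa using (List.mem_filter.mp hy).2
        simp [this, hxv]
      have h2 : ∀ y ∈ t.flatMap (fun v => ys.filter (fun r => k r == v)),
          decide (k x < k y) = true := by
        intro y hy
        have := (mem_pvBuckets k t ys y).mp (by simpa [pvBuckets] using hy)
        have : v < k y := hvt _ this.2
        simp [hxv]; omega
      rw [insertBy_append_not _ _ _ _ h1, insertBy_all_before _ _ _ h2]
      have hnx : k x ∉ t := fun h => by have := hvt _ h; omega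
      have := pvBuckets_snoc_not k t ys x hnx
      simp only [pvBuckets] at this
      rw [List.filter_append, this]
      simp [hxv]
    · have hxt : k x ∈ t := by
        cases hx with
        | head => exact absurd rfl hxv
        | tail _ h => exact h
      have hvx : v < k x := hvt _ hxt
      have h1 : ∀ y ∈ ys.filter (fun r => k r == v), decide (k x < k y) = false := by
        intro y hy
        have : k y = v := by simpa using (List.mem_filter.mp hy).2
        simp [this]; omega
      rw [insertBy_append_not _ _ _ _ h1, ih ys hpt hxt]
      rw [List.filter_append]
      simp [hxv]

lemma foldl_insert_pvBuckets (k : List Int → Nat) (vs : List Nat) (hvs : vs.Pairwise (· < ·)) :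
    ∀ (xs ys : List (List Int)), (∀ x ∈ xs, k x ∈ vs) →
      xs.foldl (fun acc x => PySem.List.insertBy (fun a b => decide (k a < k b)) x acc)
        (pvBuckets k vs ys) = pvBuckets k vs (ys ++ xs) := by
  intro xs
  induction xs with
  | nil => intro ys _; simp
  | cons x t ih =>
    intro ys hmem
    simp only [List.foldl_cons]
    rw [insert_pvBuckets k x vs ys hvs (hmem x (by simp))]
    rw [ih (ys ++ [x]) (fun y hy => hmem y (by simp [hy]))]
    simp

lemma pvBuckets_nil (k : List Int → Nat) (vs : List Nat) : pvBuckets k vs [] = [] := by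
  simp [pvBuckets]

lemma sorted_eq_pvBuckets (k : List Int → Nat) (xs : List (List Int)) (c : Nat)
    (h : ∀ x ∈ xs, k x ≤ c) :
    PySem.List.sorted xs k = pvBuckets k (List.range (c + 1)) xs := by
  rw [PySem.List.sorted_eq_foldl_insertBy]
  have h0 := foldl_insert_pvBuckets k (List.range (c + 1)) (List.pairwise_lt_range) xs []
    (fun x hx => by simp only [List.mem_range]; exact Nat.lt_succ_of_le (h x hx))
  rw [pvBuckets_nil] at h0
  simpa using h0

lemma A_inv (mat : List (List Int)) (c : Nat) (j : Nat) (hj : j ≤ c) :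
    (List.range j).foldl
      (fun (st : List (List Int) × List (List Int)) j =>
        let nova := st.2.foldl (fun acc r => if r.getD j 0 ≠ 0 then acc ++ [r] else acc) st.1
        (nova, st.2.filter (fun x => !(nova.contains x))))
      ([], mat)
    = (pvBuckets (pvKljuc c) (List.range j) mat,
       mat.filter (fun r => decide (j ≤ pvKljuc c r))) := by
  induction j with
  | zero => simp [pvBuckets]
  | succ j ih =>
    have hj' : j ≤ c := by omega
    have hjc : j < c := by omega
    rw [List.range_succ, List.foldl_append, ih hj']
    simp only [List.foldl_cons, List.foldl_nil]
    have e1 : (mat.filter (fun r => decide (j ≤ pvKljuc c r))).foldl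
        (fun acc r => if r.getD j 0 ≠ 0 then acc ++ [r] else acc)
        (pvBuckets (pvKljuc c) (List.range j) mat)
        = pvBuckets (pvKljuc c) (List.range j) mat
          ++ (mat.filter (fun r => decide (j ≤ pvKljuc c r))).filter
               (fun r => decide (r.getD j 0 ≠ 0)) := by
      rw [PySem.List.foldl_append_ite_eq_filter]
    have e2 : (mat.filter (fun r => decide (j ≤ pvKljuc c r))).filter
        (fun r => decide (r.getD j 0 ≠ 0)) = mat.filter (fun r => pvKljuc c r == j) := by
      rw [List.filter_filter]
      apply List.filter_congr
      intro r _
      have hiff := pvKljuc_eq_iff c j r hjc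
      rw [List.getD_eq_getElem?_getD] at hiff
      by_cases h : pvKljuc c r = j
      · have := hiff.mp h
        simp [h, this.2]
      · have hb : (pvKljuc c r == j) = false := by simp [h]
        rw [hb]
        by_cases h1 : j ≤ pvKljuc c r
        · have h2 : r[j]?.getD 0 = 0 := by
            by_contra hz
            exact h (hiff.mpr ⟨h1, hz⟩)
          simp [h2]
        · simp [h1]
    have e3 : pvBuckets (pvKljuc c) (List.range j) mat ++ mat.filter (fun r => pvKljuc c r == j)
        = pvBuckets (pvKljuc c) (List.range j ++ [j]) mat := by
      simp [pvBuckets]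
    rw [e1, e2, e3]
    refine Prod.ext rfl ?_
    simp only
    rw [List.filter_filter]
    apply List.filter_congr
    intro r hr
    have hmem : r ∈ pvBuckets (pvKljuc c) (List.range j ++ [j]) mat ↔ pvKljuc c r ≤ j := by
      rw [mem_pvBuckets]
      simp only [List.mem_append, List.mem_range, List.mem_singleton]
      constructor
      · rintro ⟨_, h⟩; omega
      · intro h; exact ⟨hr, by omega⟩
    by_cases h : pvKljuc c r ≤ j
    · have : r ∈ pvBuckets (pvKljuc c) (List.range j ++ [j]) mat := hmem.mpr h
      have hc : (pvBuckets (pvKljuc c) (List.range j ++ [j]) mat).contains r = true := by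
        simpa [List.contains_iff_mem] using this
      simp only [hc, Bool.not_true, Bool.false_and]
      have hn : ¬ (j + 1 ≤ pvKljuc c r) := by omega
      simp [hn]
    · have : r ∉ pvBuckets (pvKljuc c) (List.range j ++ [j]) mat := fun hm => h (hmem.mp hm)
      have hc : (pvBuckets (pvKljuc c) (List.range j ++ [j]) mat).contains r = false := by
        simpa [List.contains_iff_mem] using this
      simp only [hc, Bool.not_false, Bool.true_and]
      rw [decide_eq_decide]
      omega

lemma filter_top_eq (mat : List (List Int)) (c : Nat) :
    mat.filter (fun r => decide (c ≤ pvKljuc c r)) = mat.filter (fun r => pvKljuc c r == c) := by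
  apply List.filter_congr
  intro r _
  have hle := pvKljuc_le c r
  by_cases h : pvKljuc c r = c
  · simp [h]
  · have h1 : ¬ (c ≤ pvKljuc c r) := by omega
    simp [h, h1]

-- ===== VERDICT (by name: the statement is the Claim_ definition above) =====
theorem uredi_v_zgornjetrikotno_spec : Claim_equal_uredi_v_zgornjetrikotno := by
  unfold Claim_equal_uredi_v_zgornjetrikotno
  intro mat _ _
  unfold Spec_uredi_v_zgornjetrikotno uredi_v_zgornjetrikotno uredi_v_zgornjetrikotno_alt
  simp only
  rw [A_inv mat mat.headI.length mat.headI.length (le_refl _)]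
  rw [sorted_eq_pvBuckets (pvKljuc mat.headI.length) mat mat.headI.length
    (fun x _ => pvKljuc_le _ x)]
  rw [filter_top_eq]
  simp [pvBuckets, List.range_succ]
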